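-- pv_equiv track=rewrite | github.com/Maciasssss/OK-2025 | zad3/zad3.py | maksymalna_liczba_stron
-- ===== SOURCE A (Python) =====
-- from typing import List, Tuple
-- from math import gcd as math_gcd
--
-- def maksymalna_liczba_stron(budzet: int, ceny: List[int], strony: List[int]) -> int:
--     n = len(ceny)
--     if n == 0 or budzet <= 0:
--         return 0
--
--     # Fast path: If we can buy all books, return total pages
--     total_cost = 0
--     for cost in ceny:
--         total_cost += cost
--     if total_cost <= budzet:
--         return sum(strony)
--
--     # Extract zero-cost books (always include them)
--     zero_cost_pages = 0
--     non_zero_costs = []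
--     non_zero_pages = []
--
--     for i in range(n):
--         if ceny[i] == 0:
--             zero_cost_pages += strony[i]
--         else:
--             non_zero_costs.append(ceny[i])
--             non_zero_pages.append(strony[i])
--
--     # No non-zero cost books? Return just the zero-cost pages
--     if not non_zero_costs:
--         return zero_cost_pages
--
--     # Reduce the problem size by finding the GCD of all costs
--     current_gcd = non_zero_costs[0]
--     for cost in non_zero_costs[1:]:
--         current_gcd = math_gcd(current_gcd, cost)
--
--     # Scale down the costs and budget if possible
--     if current_gcd > 1:
--         scaled_costs = [c // current_gcd for c in non_zero_costs]
--         scaled_budget = budzet // current_gcd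
--     else:
--         scaled_costs = non_zero_costs
--         scaled_budget = budzet
--
--     # Initialize dp array with smallest possible size
--     dp = [0] * (scaled_budget + 1)
--
--     # Perform the knapsack DP algorithm with optimizations
--     for i in range(len(scaled_costs)):
--         cost = scaled_costs[i]
--         page = non_zero_pages[i]
--
--         if page <= 0:
--             continue
--
--         # Use faster reverse iteration to avoid duplicate counting
--         # Only iterate through valid budget ranges
--         for j in range(scaled_budget, cost - 1, -1):
--             new_value = dp[j - cost] + page
--             if new_value > dp[j]:
--                 dp[j] = new_value
--
--     # Return the result including zero-cost book pages
--     return dp[scaled_budget] + zero_cost_pages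
-- ===== SOURCE B (Python) =====
-- def maksymalna_liczba_stron(budzet, ceny, strony):
--     n = len(ceny)
--     if n == 0 or budzet <= 0:
--         return 0
--     if sum(ceny) <= budzet:
--         return sum(strony)
--     darmowe = 0          # zero-cost books are always taken
--     platne = []
--     for i in range(n):
--         c = ceny[i]
--         p = strony[i]
--         if c == 0:
--             darmowe += p
--         elif p > 0:
--             platne.append((c, p))
--     # sparse knapsack over exact amounts spent: spent -> max pages costing exactly that
--     best = {0: 0}
--     for c, p in platne:
--         nowe = dict(best)
--         for s, v in best.items():
--             t = s + c
--             if t <= budzet: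
--                 w = v + p
--                 if t not in nowe or w > nowe[t]:
--                     nowe[t] = w
--         best = nowe
--     return max(best.values()) + darmowe
-- ===== Notes on version B (the rewrite author's own statement) =====
-- stated objective: alternative
-- what changed: B replaces A's gcd-scaled dense dp array updated by reverse in-place iteration with a sparse dictionary keyed by the exact amount spent, built forward item by item (free books summed separately), returning the max of its values; no gcd scaling is needed since the sparse key set adapts by itself.
import Mathlib
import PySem

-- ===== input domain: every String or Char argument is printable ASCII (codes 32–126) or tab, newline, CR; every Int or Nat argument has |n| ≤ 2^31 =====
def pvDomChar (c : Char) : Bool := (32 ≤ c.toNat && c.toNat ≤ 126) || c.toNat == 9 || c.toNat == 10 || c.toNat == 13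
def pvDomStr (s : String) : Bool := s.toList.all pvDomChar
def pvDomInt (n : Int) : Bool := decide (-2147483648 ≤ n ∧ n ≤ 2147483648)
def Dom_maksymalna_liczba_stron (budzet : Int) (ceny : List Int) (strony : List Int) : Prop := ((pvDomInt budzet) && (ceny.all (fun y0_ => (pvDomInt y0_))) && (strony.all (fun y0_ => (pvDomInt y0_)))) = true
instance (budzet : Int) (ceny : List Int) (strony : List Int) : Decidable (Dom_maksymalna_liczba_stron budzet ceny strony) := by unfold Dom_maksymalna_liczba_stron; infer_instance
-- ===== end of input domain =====

-- B replaces A's gcd-scaled dense dp array (reverse in-place updates) by a sparse dict keyed by the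
-- exact amount spent, built forward item by item; an alternative algorithm of similar cost.

-- ===== PORT A =====
-- math.gcd folded over a list (current_gcd loop of A)
def pvGcdFold (init : Int) (l : List Int) : Int :=
  l.foldl (fun g c => (Int.gcd g c : Int)) init

-- one item's reverse dp sweep: for j in range(scaled_budget, cost-1, -1)
-- (list indices are in range under Pre_; pyGetD's default is never used there)
def pvDpItem (scaled_budget cost page : Int) (dp : List Int) : List Int :=
  (PySem.List.pyRange scaled_budget (cost - 1) (-1)).foldl (fun dp j =>
    let new_value := PySem.List.pyGetD dp (j - cost) 0 + page
    if new_value > PySem.List.pyGetD dp j 0 then dp.set j.toNat new_value else dp) dp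

def maksymalna_liczba_stron (budzet : Int) (ceny : List Int) (strony : List Int) : Int :=
  if ceny.length = 0 ∨ budzet ≤ 0 then 0
  else
    let total_cost := ceny.foldl (· + ·) 0
    if total_cost ≤ budzet then strony.sum
    else
      let st := (PySem.List.pyRange 0 (ceny.length : Int) 1).foldl
        (fun (st : Int × List Int × List Int) i =>
          if PySem.List.pyGetD ceny i 0 = 0 then
            (st.1 + PySem.List.pyGetD strony i 0, st.2.1, st.2.2)
          else
            (st.1, st.2.1 ++ [PySem.List.pyGetD ceny i 0], st.2.2 ++ [PySem.List.pyGetD strony i 0]))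
        (0, [], [])
      let zero_cost_pages := st.1
      let non_zero_costs := st.2.1
      let non_zero_pages := st.2.2
      if non_zero_costs = [] then zero_cost_pages
      else
        let current_gcd := pvGcdFold (non_zero_costs.headD 0) non_zero_costs.tail
        let scaled_costs := if current_gcd > 1 then non_zero_costs.map (fun c => PySem.Int.floordiv c current_gcd) else non_zero_costs
        let scaled_budget := if current_gcd > 1 then PySem.Int.floordiv budzet current_gcd else budzet
        let dp0 : List Int := List.replicate (scaled_budget + 1).toNat 0
        let dp := (PySem.List.pyRange 0 (scaled_costs.length : Int) 1).foldl (fun dp i =>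
            let cost := PySem.List.pyGetD scaled_costs i 0
            let page := PySem.List.pyGetD non_zero_pages i 0
            if page ≤ 0 then dp else pvDpItem scaled_budget cost page dp) dp0
        PySem.List.pyGetD dp scaled_budget 0 + zero_cost_pages

-- ===== PORT B =====
-- the inner pass of Source B: for s, v in best.items(): conditionally insert s+c ↦ v+p into nowe
def pvSparseStep (budzet c p : Int) (best : PySem.Dict Int Int) : PySem.Dict Int Int :=
  best.items.foldl (fun (nowe : PySem.Dict Int Int) sv =>
    let t := sv.1 + c
    if t ≤ budzet then
      let w := sv.2 + p
      if nowe.contains t = false ∨ w > nowe.getD t 0 then nowe.insert t w else nowe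
    else nowe) best

def maksymalna_liczba_stron_alt (budzet : Int) (ceny : List Int) (strony : List Int) : Int :=
  if ceny.length = 0 ∨ budzet ≤ 0 then 0
  else if ceny.sum ≤ budzet then strony.sum
  else
    -- for i in range(n): c = ceny[i]; p = strony[i]; … (indices in range under Pre_)
    let ex := (PySem.List.pyRange 0 (ceny.length : Int) 1).foldl
      (fun (st : Int × List (Int × Int)) i =>
        if PySem.List.pyGetD ceny i 0 = 0 then (st.1 + PySem.List.pyGetD strony i 0, st.2)
        else if PySem.List.pyGetD strony i 0 > 0 then
          (st.1, st.2 ++ [(PySem.List.pyGetD ceny i 0, PySem.List.pyGetD strony i 0)])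
        else st) (0, [])
    let darmowe := ex.1
    let platne := ex.2
    let best := platne.foldl (fun best cp => pvSparseStep budzet cp.1 cp.2 best)
      (PySem.Dict.ofList [((0 : Int), (0 : Int))])
    -- best.values is never empty ({0: 0} is always present), so max() never raises
    (PySem.List.max? best.values (fun v => v)).getD 0 + darmowe

-- ===== PRECONDITION & SPEC =====
-- Pre_ excludes exactly the inputs on which A raises IndexError: those that reach the main loop
-- (nonempty ceny, positive budget, total cost above budget) with strony shorter than ceny or
-- with a negative price paired with a positive page count.
def Pre_maksymalna_liczba_stron (budzet : Int) (ceny : List Int) (strony : List Int) : Prop :=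
  ceny = [] ∨ budzet ≤ 0 ∨ ceny.sum ≤ budzet ∨
    (ceny.length ≤ strony.length ∧ ∀ cp ∈ ceny.zip strony, ¬(cp.1 < 0 ∧ cp.2 > 0))
instance (budzet : Int) (ceny : List Int) (strony : List Int) : Decidable (Pre_maksymalna_liczba_stron budzet ceny strony) := by unfold Pre_maksymalna_liczba_stron; infer_instance

def pvWitness_maksymalna_liczba_stron : Int × List Int × List Int := (5, [3, 4, 6], [5, 2, 7])

def Spec_maksymalna_liczba_stron (budzet : Int) (ceny : List Int) (strony : List Int) (out : Int) : Prop := out = maksymalna_liczba_stron_alt budzet ceny strony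
instance (budzet : Int) (ceny : List Int) (strony : List Int) (out : Int) : Decidable (Spec_maksymalna_liczba_stron budzet ceny strony out) := by unfold Spec_maksymalna_liczba_stron; infer_instance

-- ===== CLAIM (what is proved, stated in full; the proofs are below) =====
def Claim_equal_maksymalna_liczba_stron : Prop := ∀ (budzet : Int) (ceny : List Int) (strony : List Int), Dom_maksymalna_liczba_stron budzet ceny strony → Pre_maksymalna_liczba_stron budzet ceny strony → Spec_maksymalna_liczba_stron budzet ceny strony (maksymalna_liczba_stron budzet ceny strony)

-- ===== LEMMAS AND PROOFS =====
-- spec: best pages obtainable from items within budget (0/1 knapsack value)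
def pvBest : List (Int × Int) → Int → Int
  | [], _ => 0
  | cp :: t, b => if cp.1 ≤ b then max (pvBest t b) (cp.2 + pvBest t (b - cp.1)) else pvBest t b

def pvOmax (x y : Option Int) : Option Int :=
  match x, y with
  | none, y => y
  | some a, none => some a
  | some a, some b => some (max a b)

-- best pages over subsets whose costs sum to exactly s (none if no such subset)
def pvEB : List (Int × Int) → Int → Option Int
  | [], s => if s = 0 then some 0 else none
  | cp :: t, s => pvOmax (pvEB t s) ((pvEB t (s - cp.1)).map (· + cp.2))

theorem pvOmax_map_add (x y : Option Int) (p : Int) :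
    (pvOmax x y).map (· + p) = pvOmax (x.map (· + p)) (y.map (· + p)) := by
  cases x <;> cases y <;> simp [pvOmax, max_add_add_right]

theorem pvBest_snoc (L : List (Int × Int)) (cp : Int × Int) (hc : ∀ q ∈ L, 0 ≤ q.1)
    (hcp : 0 ≤ cp.1) (b : Int) :
    pvBest (L ++ [cp]) b =
      if cp.1 ≤ b then max (pvBest L b) (cp.2 + pvBest L (b - cp.1)) else pvBest L b := by
  induction L generalizing b with
  | nil => simp [pvBest]
  | cons x t ih =>
    have hx : (0:Int) ≤ x.1 := hc x (by simp)
    have ht : ∀ q ∈ t, (0:Int) ≤ q.1 := fun q hq => hc q (by simp [hq])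
    simp only [List.cons_append, pvBest, ih ht]
    rw [show b - cp.1 - x.1 = b - x.1 - cp.1 from by ring]
    simp only [max_def]
    split_ifs <;> omega

theorem pvEB_snoc (L : List (Int × Int)) (cp : Int × Int) (s : Int) :
    pvEB (L ++ [cp]) s = pvOmax (pvEB L s) ((pvEB L (s - cp.1)).map (· + cp.2)) := by
  induction L generalizing s with
  | nil => simp [pvEB, pvOmax]
  | cons x t ih =>
    simp only [List.cons_append, pvEB, ih, pvOmax_map_add, Option.map_map]
    have h : s - x.1 - cp.1 = s - cp.1 - x.1 := by ring
    rw [h]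
    generalize pvEB t s = A
    generalize pvEB t (s - cp.1) = B
    generalize pvEB t (s - cp.1 - x.1) = D
    generalize pvEB t (s - x.1) = C
    cases A <;> cases B <;> cases C <;> cases D <;>
      (try simp only [pvOmax, Option.map_none, Option.map_some, Function.comp_def]) <;>
      (first
        | rfl
        | (congr 1; rw [max_def]; split_ifs <;> omega)
        | (congr 1; omega))

theorem pvEB_some_nonneg (L : List (Int × Int)) (hc : ∀ cp ∈ L, 0 ≤ cp.1) :
    ∀ s v, pvEB L s = some v → 0 ≤ s := by
  induction L with
  | nil => intro s v h; simp [pvEB] at h; omega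
  | cons x t ih =>
    intro s v h
    have hx := hc x (by simp)
    have ht : ∀ cp ∈ t, 0 ≤ cp.1 := fun cp hcp => hc cp (by simp [hcp])
    simp only [pvEB] at h
    cases h1 : pvEB t s with
    | some a => exact ih ht s a h1
    | none =>
      rw [h1] at h
      cases h2 : pvEB t (s - x.1) with
      | none => rw [h2] at h; simp [pvOmax] at h
      | some w => have := ih ht (s - x.1) w h2; omega

theorem pvBest_le_cons (x : Int × Int) (t : List (Int × Int)) (b : Int) :
    pvBest t b ≤ pvBest (x :: t) b := by
  simp only [pvBest]; split_ifs <;> simp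

theorem pvEB_le (L : List (Int × Int)) (hc : ∀ cp ∈ L, 0 ≤ cp.1) :
    ∀ b s v, s ≤ b → pvEB L s = some v → v ≤ pvBest L b := by
  induction L with
  | nil => intro b s v _ h; simp [pvEB] at h; simp [pvBest]; omega
  | cons x t ih =>
    intro b s v hsb h
    have hx := hc x (by simp)
    have ht : ∀ cp ∈ t, 0 ≤ cp.1 := fun cp hcp => hc cp (by simp [hcp])
    simp only [pvEB] at h
    have hcons := pvBest_le_cons x t b
    cases h1 : pvEB t s with
    | some a =>
      rw [h1] at h
      have ha := ih ht b s a hsb h1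
      cases h2 : pvEB t (s - x.1) with
      | none => rw [h2] at h; simp [pvOmax] at h; omega
      | some w =>
        rw [h2] at h
        have hs := pvEB_some_nonneg t ht _ _ h2
        have hw := ih ht (b - x.1) (s - x.1) w (by omega) h2
        have hxb : x.1 ≤ b := by omega
        simp [pvOmax] at h
        simp only [pvBest, if_pos hxb]
        subst h
        have h3 : pvBest t b ≤ max (pvBest t b) (x.2 + pvBest t (b - x.1)) := le_max_left _ _
        have h4 : w + x.2 ≤ x.2 + pvBest t (b - x.1) := by omega
        have h5 : x.2 + pvBest t (b - x.1) ≤ max (pvBest t b) (x.2 + pvBest t (b - x.1)) := le_max_right _ _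
        omega
    | none =>
      rw [h1] at h
      cases h2 : pvEB t (s - x.1) with
      | none => rw [h2] at h; simp [pvOmax] at h
      | some w =>
        rw [h2] at h
        have hs := pvEB_some_nonneg t ht _ _ h2
        have hw := ih ht (b - x.1) (s - x.1) w (by omega) h2
        have hxb : x.1 ≤ b := by omega
        simp [pvOmax] at h
        simp only [pvBest, if_pos hxb]
        have h5 : x.2 + pvBest t (b - x.1) ≤ max (pvBest t b) (x.2 + pvBest t (b - x.1)) := le_max_right _ _
        omega

theorem pvBest_attained (L : List (Int × Int)) (hc : ∀ cp ∈ L, 0 ≤ cp.1) :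
    ∀ b, 0 ≤ b → ∃ s, s ≤ b ∧ pvEB L s = some (pvBest L b) := by
  induction L with
  | nil => intro b hb; exact ⟨0, hb, by simp [pvEB, pvBest]⟩
  | cons x t ih =>
    intro b hb
    have hx := hc x (by simp)
    have ht : ∀ cp ∈ t, 0 ≤ cp.1 := fun cp hcp => hc cp (by simp [hcp])
    by_cases hxb : x.1 ≤ b
    · obtain ⟨s1, hs1, hEB1⟩ := ih ht b hb
      obtain ⟨s2, hs2, hEB2⟩ := ih ht (b - x.1) (by omega)
      by_cases hcase : x.2 + pvBest t (b - x.1) ≤ pvBest t b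
      · refine ⟨s1, hs1, ?_⟩
        simp only [pvEB, pvBest, if_pos hxb, hEB1]
        cases h2 : pvEB t (s1 - x.1) with
        | none => simp [pvOmax, max_eq_left hcase]
        | some w =>
          have hs := pvEB_some_nonneg t ht _ _ h2
          have hw := pvEB_le t ht (b - x.1) (s1 - x.1) w (by omega) h2
          simp only [Option.map_some, pvOmax, max_eq_left hcase]
          congr 1
          rw [max_def]; split_ifs <;> omega
      · refine ⟨s2 + x.1, by omega, ?_⟩
        simp only [pvEB, pvBest, if_pos hxb]
        have h3 : s2 + x.1 - x.1 = s2 := by ring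
        rw [h3, hEB2]
        cases h1 : pvEB t (s2 + x.1) with
        | none => simp [pvOmax]; omega
        | some a =>
          have ha := pvEB_le t ht b (s2 + x.1) a (by omega) h1
          simp [pvOmax]
          omega
    · obtain ⟨s1, hs1, hEB1⟩ := ih ht b hb
      refine ⟨s1, hs1, ?_⟩
      simp only [pvEB, pvBest, if_neg hxb, hEB1]
      cases h2 : pvEB t (s1 - x.1) with
      | none => simp [pvOmax]
      | some w =>
        have hs := pvEB_some_nonneg t ht _ _ h2
        omega

-- ---------- A-side: the reverse in-place dp sweep ----------

-- pvDpItem body (as in the port)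
def pvDpBody (cost page : Int) (dp : List Int) (j : Int) : List Int :=
  if PySem.List.pyGetD dp (j - cost) 0 + page > PySem.List.pyGetD dp j 0 then
    dp.set j.toNat (PySem.List.pyGetD dp (j - cost) 0 + page)
  else dp

theorem pvGetD_set (dp : List Int) (m j : Int) (hm : 0 ≤ m) (_hmlen : m < (dp.length : Int))
    (hj : 0 ≤ j) (hjlen : j < (dp.length : Int)) (v : Int) :
    PySem.List.pyGetD (dp.set m.toNat v) j 0 = if j = m then v else PySem.List.pyGetD dp j 0 := by
  rw [PySem.List.pyGetD_eq_getElem _ 0 hj (by simpa using hjlen),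
      PySem.List.pyGetD_eq_getElem _ 0 hj hjlen]
  rw [List.getElem_set]
  split_ifs with h1 h2 h2 <;> first | rfl | omega

theorem pvDpBody_length (cost page : Int) (dp : List Int) (j : Int) :
    (pvDpBody cost page dp j).length = dp.length := by
  unfold pvDpBody; split_ifs <;> simp

theorem pvDpSweep_get (cost page : Int) (hc : 1 ≤ cost) (old : List Int) :
    ∀ (k : Nat) (m : Int) (dp : List Int), m = cost - 1 + (k : Int) →
      dp.length = old.length → m < (old.length : Int) →
      (∀ j : Int, 0 ≤ j → j ≤ m → PySem.List.pyGetD dp j 0 = PySem.List.pyGetD old j 0) →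
      ∀ j : Int, 0 ≤ j → j < (old.length : Int) →
        PySem.List.pyGetD ((PySem.List.pyRange m (cost - 1) (-1)).foldl (pvDpBody cost page) dp) j 0
          = if cost ≤ j ∧ j ≤ m then
              max (PySem.List.pyGetD old j 0) (PySem.List.pyGetD old (j - cost) 0 + page)
            else PySem.List.pyGetD dp j 0 := by
  intro k
  induction k with
  | zero =>
    intro m dp hm _ _ _ j _ _
    rw [PySem.List.pyRange_neg_one_eq_nil (by omega)]
    simp only [List.foldl_nil]
    rw [if_neg (by omega)]
  | succ k ih =>
    intro m dp hm hlen hmlen hagree j hj hjlen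
    have hcm : cost - 1 < m := by omega
    rw [PySem.List.pyRange_neg_one_cons hcm]
    simp only [List.foldl_cons]
    have hm0 : (0:Int) ≤ m := by omega
    have hmc : (0:Int) ≤ m - cost := by omega
    have hdp_m : PySem.List.pyGetD dp m 0 = PySem.List.pyGetD old m 0 := hagree m hm0 le_rfl
    have hdp_mc : PySem.List.pyGetD dp (m - cost) 0 = PySem.List.pyGetD old (m - cost) 0 :=
      hagree (m - cost) hmc (by omega)
    have hdp1_get : ∀ i : Int, 0 ≤ i → i < (old.length : Int) →
        PySem.List.pyGetD (pvDpBody cost page dp m) i 0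
          = if i = m then max (PySem.List.pyGetD old m 0)
              (PySem.List.pyGetD old (m - cost) 0 + page)
            else PySem.List.pyGetD dp i 0 := by
      intro i hi hilen
      unfold pvDpBody
      rw [hdp_m, hdp_mc]
      by_cases him : i = m
      · rw [if_pos him]
        split_ifs with hgt
        · rw [pvGetD_set dp m i hm0 (by omega) hi (by omega), if_pos him]
          rw [max_def]; split_ifs <;> omega
        · rw [him, hdp_m, max_def]; split_ifs <;> omega
      · rw [if_neg him]
        split_ifs with hgt
        · rw [pvGetD_set dp m i hm0 (by omega) hi (by omega), if_neg him]
        · rfl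
    have hlen1 : (pvDpBody cost page dp m).length = old.length := by
      rw [pvDpBody_length]; exact hlen
    have := ih (m - 1) (pvDpBody cost page dp m) (by omega) hlen1 (by omega)
      (fun i hi him => by
        rw [hdp1_get i hi (by omega), if_neg (by omega)]
        exact hagree i hi (by omega))
      j hj hjlen
    rw [this]
    by_cases hcj : cost ≤ j ∧ j ≤ m - 1
    · rw [if_pos hcj, if_pos (by omega)]
    · rw [if_neg hcj]
      by_cases hjm : cost ≤ j ∧ j ≤ m
      · have hjem : j = m := by omega
        rw [if_pos hjm, hdp1_get j hj hjlen, if_pos hjem, hjem]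
      · rw [if_neg hjm, hdp1_get j hj hjlen, if_neg (by omega)]

theorem pvDpItem_eq_sweep (b cost page : Int) (dp : List Int) :
    pvDpItem b cost page dp = (PySem.List.pyRange b (cost - 1) (-1)).foldl (pvDpBody cost page) dp := rfl

theorem pvDpItem_length (b cost page : Int) (dp : List Int) :
    (pvDpItem b cost page dp).length = dp.length := by
  rw [pvDpItem_eq_sweep]
  induction PySem.List.pyRange b (cost - 1) (-1) generalizing dp with
  | nil => rfl
  | cons x t ih => simp only [List.foldl_cons]; rw [ih, pvDpBody_length]

-- dp over the item list, starting from the zero array: dp[j] = pvBest of the processed items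
theorem pv_dp_fold (b : Int) (hb : 0 ≤ b) (L : List (Int × Int))
    (hL : ∀ cp ∈ L, 1 ≤ cp.1 ∧ 1 ≤ cp.2) :
    (L.foldl (fun dp cp => pvDpItem b cp.1 cp.2 dp) (List.replicate (b + 1).toNat 0)).length
        = (b + 1).toNat ∧
      ∀ j : Int, 0 ≤ j → j ≤ b →
        PySem.List.pyGetD (L.foldl (fun dp cp => pvDpItem b cp.1 cp.2 dp)
          (List.replicate (b + 1).toNat 0)) j 0 = pvBest L j := by
  induction L using List.reverseRecOn with
  | nil =>
    refine ⟨by simp, fun j hj hjb => ?_⟩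
    simp only [List.foldl_nil, pvBest]
    rw [PySem.List.pyGetD_eq_getElem _ 0 hj (by simp; omega)]
    simp
  | append_singleton L cp ih =>
    have hcp := hL cp (by simp)
    have hL' : ∀ q ∈ L, 1 ≤ q.1 ∧ 1 ≤ q.2 := fun q hq => hL q (by simp [hq])
    obtain ⟨ihlen, ihget⟩ := ih hL'
    rw [List.foldl_append]
    simp only [List.foldl_cons, List.foldl_nil]
    set old := L.foldl (fun dp cp => pvDpItem b cp.1 cp.2 dp) (List.replicate (b + 1).toNat 0) with hold
    have holdlen : (old.length : Int) = b + 1 := by rw [ihlen]; omega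
    constructor
    · rw [pvDpItem_length, ihlen]
    · intro j hj hjb
      by_cases hcb : cp.1 ≤ b
      · rw [pvDpItem_eq_sweep,
          pvDpSweep_get cp.1 cp.2 hcp.1 old (b - cp.1 + 1).toNat b old
            (by omega) rfl (by omega) (fun _ _ _ => rfl) j hj (by omega)]
        rw [pvBest_snoc L cp (fun q hq => by have := hL' q hq; omega) (by omega)]
        by_cases hcj : cp.1 ≤ j
        · rw [if_pos ⟨hcj, hjb⟩, if_pos hcj, ihget j hj hjb,
            ihget (j - cp.1) (by omega) (by omega)]
          rw [max_def, max_def]; split_ifs <;> omega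
        · rw [if_neg (by omega), if_neg hcj]
          exact ihget j hj hjb
      · rw [pvDpItem_eq_sweep, PySem.List.pyRange_neg_one_eq_nil (by omega)]
        simp only [List.foldl_nil]
        rw [pvBest_snoc L cp (fun q hq => by have := hL' q hq; omega) (by omega),
          if_neg (by omega)]
        exact ihget j hj hjb

-- ---------- gcd scaling ----------

theorem pvGcdFold_dvd_init (l : List Int) : ∀ init : Int, pvGcdFold init l ∣ init := by
  induction l with
  | nil => intro init; simp [pvGcdFold]
  | cons c t ih =>
    intro init
    have h1 : pvGcdFold init (c :: t) = pvGcdFold ((Int.gcd init c : Int)) t := rfl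
    rw [h1]
    exact dvd_trans (ih _) (Int.gcd_dvd_left init c)

theorem pvGcdFold_dvd_mem (l : List Int) : ∀ init x, x ∈ l → pvGcdFold init l ∣ x := by
  induction l with
  | nil => intro _ x hx; simp at hx
  | cons c t ih =>
    intro init x hx
    have h1 : pvGcdFold init (c :: t) = pvGcdFold ((Int.gcd init c : Int)) t := rfl
    rcases List.mem_cons.mp hx with h | h
    · subst h
      rw [h1]
      exact dvd_trans (pvGcdFold_dvd_init t _) (Int.gcd_dvd_right init x)
    · rw [h1]; exact ih _ x h

theorem pvFloordiv_mul (g k : Int) (hg : 0 < g) : PySem.Int.floordiv (g * k) g = k := by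
  rw [PySem.Int.floordiv_eq_ediv_of_pos hg, Int.mul_ediv_cancel_left k (by omega)]

theorem pvFloordiv_sub_mul (b g k : Int) (hg : 0 < g) :
    PySem.Int.floordiv (b - g * k) g = PySem.Int.floordiv b g - k := by
  rw [PySem.Int.floordiv_eq_ediv_of_pos hg, PySem.Int.floordiv_eq_ediv_of_pos hg,
    show b - g * k = b + (-k) * g from by ring, Int.add_mul_ediv_right b (-k) (by omega)]
  ring

theorem pvBest_scale (g : Int) (hg : 0 < g) :
    ∀ (L : List (Int × Int)) (b : Int), (∀ cp ∈ L, g ∣ cp.1) →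
      pvBest (L.map (fun cp => (PySem.Int.floordiv cp.1 g, cp.2))) (PySem.Int.floordiv b g)
        = pvBest L b := by
  intro L
  induction L with
  | nil => intro b _; simp [pvBest]
  | cons x t ih =>
    intro b hdvd
    obtain ⟨k, hk⟩ := hdvd x (by simp)
    have ht : ∀ cp ∈ t, g ∣ cp.1 := fun cp hcp => hdvd cp (by simp [hcp])
    simp only [List.map_cons, pvBest]
    rw [hk, pvFloordiv_mul g k hg]
    have hcond : (k ≤ PySem.Int.floordiv b g) ↔ (g * k ≤ b) := by
      rw [PySem.Int.le_floordiv_iff_mul_le hg, mul_comm]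
    have hsub : PySem.Int.floordiv b g - k = PySem.Int.floordiv (b - g * k) g :=
      (pvFloordiv_sub_mul b g k hg).symm
    by_cases hle : g * k ≤ b
    · rw [if_pos (hcond.mpr hle), if_pos hle, ih b ht, hsub, ih (b - g * k) ht]
    · rw [if_neg (fun h => hle (hcond.mp h)), if_neg hle, ih b ht]

-- ---------- fold over indices = fold over the zipped lists ----------

theorem pv_foldl_range_pair {α : Type} (f : α → Int × Int → α) (xs ys : List Int)
    (hl : xs.length ≤ ys.length) (init : α) :
    (PySem.List.pyRange 0 (xs.length : Int) 1).foldl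
      (fun a i => f a (PySem.List.pyGetD xs i 0, PySem.List.pyGetD ys i 0)) init
    = (xs.zip ys).foldl f init := by
  have hzlen : (xs.zip ys).length = xs.length := by
    rw [List.length_zip]; omega
  have h1 : (PySem.List.pyRange 0 (xs.length : Int) 1).foldl
      (fun a i => f a (PySem.List.pyGetD xs i 0, PySem.List.pyGetD ys i 0)) init
      = (PySem.List.pyRange 0 ((xs.zip ys).length : Int) 1).foldl
      (fun a i => f a (PySem.List.pyGetD (xs.zip ys) i (0, 0))) init := by
    rw [hzlen]
    apply PySem.List.foldl_congr_mem
    intro acc i hi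
    have hmem := (PySem.List.mem_pyRange_one).mp hi
    have hi0 : 0 ≤ i := hmem.1
    have hilt : i < (xs.length : Int) := hmem.2
    have hizlt : i < ((xs.zip ys).length : Int) := by omega
    rw [PySem.List.pyGetD_eq_getElem xs 0 hi0 hilt,
      PySem.List.pyGetD_eq_getElem ys 0 hi0 (by omega),
      PySem.List.pyGetD_eq_getElem (xs.zip ys) (0,0) hi0 hizlt,
      List.getElem_zip]
  rw [h1]
  have h2 := PySem.List.foldl_pyRange_zero_pyGetD (xs.zip ys) (0, 0)
    (fun a z => f a z) init
  simpa using h2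

-- ---------- the two extraction loops ----------

theorem pv_extractA (l : List (Int × Int)) :
    ∀ (z : Int) (accC accP : List Int),
      l.foldl (fun (st : Int × List Int × List Int) cp =>
          if cp.1 = 0 then (st.1 + cp.2, st.2.1, st.2.2)
          else (st.1, st.2.1 ++ [cp.1], st.2.2 ++ [cp.2])) (z, accC, accP)
      = (z + ((l.filter (fun cp => cp.1 = 0)).map (·.2)).sum,
         accC ++ (l.filter (fun cp => ¬ cp.1 = 0)).map (·.1),
         accP ++ (l.filter (fun cp => ¬ cp.1 = 0)).map (·.2)) := by
  induction l with
  | nil => intro z accC accP; simp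
  | cons x t ih =>
    intro z accC accP
    simp only [List.foldl_cons, List.filter_cons]
    by_cases hx : x.1 = 0
    · rw [if_pos hx]
      simp only [hx, decide_true]
      rw [ih]
      simp [add_assoc]
    · rw [if_neg hx]
      simp only [hx, decide_false]
      rw [ih]
      simp

theorem pv_extractB (l : List (Int × Int)) :
    ∀ (z : Int) (acc : List (Int × Int)),
      l.foldl (fun (st : Int × List (Int × Int)) cp =>
          if cp.1 = 0 then (st.1 + cp.2, st.2)
          else if cp.2 > 0 then (st.1, st.2 ++ [cp]) else st) (z, acc)
      = (z + ((l.filter (fun cp => cp.1 = 0)).map (·.2)).sum,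
         acc ++ l.filter (fun cp => ¬ cp.1 = 0 ∧ 0 < cp.2)) := by
  induction l with
  | nil => intro z acc; simp
  | cons x t ih =>
    intro z acc
    simp only [List.foldl_cons, List.filter_cons]
    by_cases hx : x.1 = 0
    · rw [if_pos hx]
      simp only [hx, decide_true]
      rw [ih]
      simp [add_assoc]
    · rw [if_neg hx]
      by_cases hp : 0 < x.2
      · rw [if_pos hp, ih]
        simp [hx, hp]
      · rw [if_neg hp, ih]
        have h1 : decide (¬ x.1 = 0 ∧ 0 < x.2) = false := by simp [hx]; omega
        simp only [h1]
        simp [hx]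

-- ---------- B-side: the sparse dict ----------

theorem pv_lookup_eq_none (P : List (Int × Int)) (a : Int) (h : ∀ q ∈ P, q.1 ≠ a) :
    P.lookup a = none := by
  induction P with
  | nil => rfl
  | cons q t ih =>
    have hq : q.1 ≠ a := h q (by simp)
    cases q with
    | mk k v =>
      have hbe : (a == k) = false := by
        simp only [beq_eq_false_iff_ne]
        simpa [eq_comm] using hq
      simp only [List.lookup, hbe]
      exact ih (fun r hr => h r (by simp [hr]))

theorem pv_dict_get?_eq_lookup (l : List (Int × Int)) (x : Int) :
    (PySem.Dict.mk l).get? x = l.lookup x := by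
  induction l with
  | nil => rfl
  | cons q t ih =>
    cases q with
    | mk k v =>
      rw [PySem.Dict.get?_mk_cons]
      by_cases h : k = x
      · subst h
        simp [List.lookup]
      · have hbe1 : (k == x) = false := by simp [h]
        have hbe2 : (x == k) = false := by simp [Ne.symm h]
        simp only [List.lookup, hbe1, hbe2]
        exact ih

-- one conditional max-insert of the inner loop, seen through get?
theorem pv_body_get? (b c p : Int) (d : PySem.Dict Int Int) (sk svv : Int) (t : Int) :
    (if sk + c ≤ b then
        (if d.contains (sk + c) = false ∨ svv + p > d.getD (sk + c) 0
          then d.insert (sk + c) (svv + p) else d)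
      else d).get? t
    = if t = sk + c ∧ t ≤ b then pvOmax (d.get? t) (some (svv + p)) else d.get? t := by
  by_cases hb : sk + c ≤ b
  · rw [if_pos hb]
    by_cases ht : t = sk + c
    · rw [if_pos (show t = sk + c ∧ t ≤ b from ⟨ht, by omega⟩), ht]
      cases hg : d.get? (sk + c) with
      | none =>
        have hcont : d.contains (sk + c) = false := by
          rw [PySem.Dict.contains_eq_isSome_get?, hg]; rfl
        rw [if_pos (Or.inl hcont), PySem.Dict.get?_insert_self]
        rfl
      | some a =>
        have hcont : d.contains (sk + c) = true := by
          rw [PySem.Dict.contains_eq_isSome_get?, hg]; rfl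
        have hgetD : d.getD (sk + c) 0 = a := by
          rw [PySem.Dict.getD_eq_get?_getD, hg]; rfl
        by_cases hw : svv + p > a
        · rw [if_pos (Or.inr (by rw [hgetD]; exact hw)), PySem.Dict.get?_insert_self]
          simp only [pvOmax]
          rw [max_eq_right (by omega)]
        · have hcond : ¬ (d.contains (sk + c) = false ∨ svv + p > d.getD (sk + c) 0) := by
            rw [hcont, hgetD]; simp; omega
          rw [if_neg hcond, hg]
          simp only [pvOmax]
          rw [max_eq_left (by omega)]
    · rw [if_neg (show ¬ (t = sk + c ∧ t ≤ b) from fun h => ht h.1)]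
      split_ifs with h1
      · exact PySem.Dict.get?_insert_of_ne d (svv + p) ht
      · rfl
  · rw [if_neg hb, if_neg (show ¬ (t = sk + c ∧ t ≤ b) from fun h => hb (h.1 ▸ h.2))]

theorem pv_step_get? (b c p : Int) :
    ∀ (P : List (Int × Int)) (d : PySem.Dict Int Int),
      ((P.map (fun sv => sv.1 + c)).Nodup) → ∀ t : Int,
      (P.foldl (fun (nowe : PySem.Dict Int Int) sv =>
          if sv.1 + c ≤ b then
            (if nowe.contains (sv.1 + c) = false ∨ sv.2 + p > nowe.getD (sv.1 + c) 0
              then nowe.insert (sv.1 + c) (sv.2 + p) else nowe)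
          else nowe) d).get? t
      = if t ≤ b then pvOmax (d.get? t) ((P.lookup (t - c)).map (· + p)) else d.get? t := by
  intro P
  induction P with
  | nil =>
    intro d _ t
    simp only [List.foldl_nil, List.lookup, Option.map_none]
    split_ifs
    · cases d.get? t <;> rfl
    · rfl
  | cons sv P ih =>
    intro d hnd t
    have hnd' : (P.map (fun sv => sv.1 + c)).Nodup := (List.nodup_cons.mp hnd).2
    have hnotmem : sv.1 + c ∉ P.map (fun sv => sv.1 + c) := (List.nodup_cons.mp hnd).1
    simp only [List.foldl_cons]
    cases sv with
    | mk sk svv =>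
      rw [ih _ hnd' t, pv_body_get? b c p d sk svv t]
      by_cases htb : t ≤ b
      · rw [if_pos htb, if_pos htb]
        by_cases hkey : sk = t - c
        · have hbe : (t - c == sk) = true := by simp [hkey]
          have hPnone : P.lookup (t - c) = none := by
            apply pv_lookup_eq_none
            intro q hq hqa
            apply hnotmem
            rw [List.mem_map]
            refine ⟨q, hq, ?_⟩
            simp only []
            omega
          have htc : t = sk + c := by omega
          rw [hPnone, if_pos (show t = sk + c ∧ t ≤ b from ⟨htc, htb⟩)]
          simp only [List.lookup, hbe, Option.map_none, Option.map_some]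
          cases d.get? t <;> rfl
        · have hbe : (t - c == sk) = false := by
            simp only [beq_eq_false_iff_ne]
            omega
          rw [if_neg (show ¬ (t = sk + c ∧ t ≤ b) from fun h => hkey (by omega))]
          simp only [List.lookup, hbe]
      · rw [if_neg htb, if_neg htb,
          if_neg (show ¬ (t = sk + c ∧ t ≤ b) from fun h => htb h.2)]

theorem pv_step_nodup (b c p : Int) (P : List (Int × Int)) (d : PySem.Dict Int Int)
    (h : d.keys.Nodup) :
    (P.foldl (fun (nowe : PySem.Dict Int Int) sv =>
        if sv.1 + c ≤ b then
          (if nowe.contains (sv.1 + c) = false ∨ sv.2 + p > nowe.getD (sv.1 + c) 0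
            then nowe.insert (sv.1 + c) (sv.2 + p) else nowe)
        else nowe) d).keys.Nodup := by
  induction P generalizing d with
  | nil => exact h
  | cons sv P ih =>
    simp only [List.foldl_cons]
    apply ih
    split_ifs with h1 h2
    · exact PySem.Dict.nodup_keys_insert _ _ _ h
    · exact h
    · exact h

theorem pvSparseStep_eq (b c p : Int) (d : PySem.Dict Int Int) :
    pvSparseStep b c p d = d.items.foldl (fun (nowe : PySem.Dict Int Int) sv =>
      if sv.1 + c ≤ b then
        (if nowe.contains (sv.1 + c) = false ∨ sv.2 + p > nowe.getD (sv.1 + c) 0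
          then nowe.insert (sv.1 + c) (sv.2 + p) else nowe)
      else nowe) d := rfl

theorem pv_get?_eq_lookup_items (d : PySem.Dict Int Int) (x : Int) :
    d.get? x = d.items.lookup x := by
  cases d with
  | mk l => exact pv_dict_get?_eq_lookup l x

def pvSparseFold (b : Int) (L : List (Int × Int)) : PySem.Dict Int Int :=
  L.foldl (fun best cp => pvSparseStep b cp.1 cp.2 best)
    (PySem.Dict.ofList [((0 : Int), (0 : Int))])

theorem pv_ofList_get? (t : Int) :
    (PySem.Dict.ofList [((0 : Int), (0 : Int))]).get? t = if t = 0 then some 0 else none := by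
  by_cases h : t = 0
  · subst h; decide
  · rw [if_neg h, pv_get?_eq_lookup_items]
    have hitems : (PySem.Dict.ofList [((0 : Int), (0 : Int))]).items = [((0:Int), (0:Int))] := by decide
    rw [hitems]
    exact pv_lookup_eq_none _ _ (by simpa using fun h' => h h'.symm)

theorem pv_sparse_inv (b : Int) (hb : 1 ≤ b) (L : List (Int × Int))
    (hL : ∀ cp ∈ L, 1 ≤ cp.1 ∧ 1 ≤ cp.2) :
    (pvSparseFold b L).keys.Nodup ∧
      ∀ t : Int, (pvSparseFold b L).get? t = if t ≤ b then pvEB L t else none := by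
  induction L using List.reverseRecOn with
  | nil =>
    constructor
    · exact (by decide : (PySem.Dict.ofList [((0:Int),(0:Int))]).keys.Nodup)
    · intro t
      rw [show pvSparseFold b [] = PySem.Dict.ofList [((0:Int),(0:Int))] from rfl, pv_ofList_get? t]
      simp only [pvEB]
      split_ifs <;> first | rfl | omega
  | append_singleton L cp ihfull =>
    have hcp := hL cp (by simp)
    have hL' : ∀ q ∈ L, 1 ≤ q.1 ∧ 1 ≤ q.2 := fun q hq => hL q (by simp [hq])
    obtain ⟨ihnd, ihget⟩ := ihfull hL'
    have hfold : pvSparseFold b (L ++ [cp]) = pvSparseStep b cp.1 cp.2 (pvSparseFold b L) := by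
      unfold pvSparseFold
      rw [List.foldl_append, List.foldl_cons, List.foldl_nil]
    set D := pvSparseFold b L with hD
    have hkeys_eq : D.keys = D.items.map (·.1) := rfl
    have hmapnd : (D.items.map (fun sv => sv.1 + cp.1)).Nodup := by
      have h1 : D.items.map (fun sv => sv.1 + cp.1) = (D.items.map (·.1)).map (· + cp.1) := by
        rw [List.map_map]; rfl
      rw [h1, ← hkeys_eq]
      exact ihnd.map (fun a b h => by omega)
    constructor
    · rw [hfold, pvSparseStep_eq]
      exact pv_step_nodup b cp.1 cp.2 D.items D ihnd
    · intro t
      rw [hfold, pvSparseStep_eq, pv_step_get? b cp.1 cp.2 D.items D hmapnd t]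
      rw [← pv_get?_eq_lookup_items D (t - cp.1)]
      by_cases htb : t ≤ b
      · rw [if_pos htb, if_pos htb, ihget t, ihget (t - cp.1),
          if_pos htb, if_pos (show t - cp.1 ≤ b by omega)]
        rw [pvEB_snoc]
      · rw [if_neg htb, if_neg htb, ihget t, if_neg htb]

theorem pv_sparse_max (b : Int) (hb : 1 ≤ b) (L : List (Int × Int))
    (hL : ∀ cp ∈ L, 1 ≤ cp.1 ∧ 1 ≤ cp.2) :
    (PySem.List.max? (pvSparseFold b L).values (fun v => v)).getD 0 = pvBest L b := by
  obtain ⟨hnd, hinv⟩ := pv_sparse_inv b hb L hL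
  have hcosts : ∀ cp ∈ L, (0:Int) ≤ cp.1 := fun cp hcp => by have := hL cp hcp; omega
  have hvalues : (pvSparseFold b L).values = (pvSparseFold b L).items.map (·.2) := rfl
  obtain ⟨s, hs, hEB⟩ := pvBest_attained L hcosts b (by omega)
  have hgets : (pvSparseFold b L).get? s = some (pvBest L b) := by
    rw [hinv s, if_pos hs, hEB]
  have hmemitems := PySem.Dict.mem_items_of_get?_eq_some _ hgets
  have hmemval : pvBest L b ∈ (pvSparseFold b L).values := by
    rw [hvalues]
    exact List.mem_map.mpr ⟨(s, pvBest L b), hmemitems, rfl⟩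
  cases hmax : PySem.List.max? (pvSparseFold b L).values (fun v => v) with
  | none =>
    exact absurd (List.ne_nil_of_mem hmemval)
      (by simpa using (PySem.List.max?_eq_none_iff _ _).mp hmax)
  | some m =>
    have hmmem := PySem.List.max?_mem hmax
    have hm_le : m ≤ pvBest L b := by
      rw [hvalues] at hmmem
      obtain ⟨q, hq, hq2⟩ := List.mem_map.mp hmmem
      have hget : (pvSparseFold b L).get? q.1 = some q.2 := by
        apply PySem.Dict.get?_of_mem_items _ _ hnd
        exact (show (q.1, q.2) ∈ _ from by simpa using hq)
      rw [hinv q.1] at hget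
      by_cases hqb : q.1 ≤ b
      · rw [if_pos hqb] at hget
        have := pvEB_le L hcosts b q.1 q.2 hqb hget
        omega
      · rw [if_neg hqb] at hget; exact absurd hget (by simp)
    have hle_m : pvBest L b ≤ m := PySem.List.max?_isMax hmax _ hmemval
    simp only [Option.getD_some]
    omega

theorem pvGcd_all_dvd (xs : List Int) (hne : xs ≠ []) :
    ∀ x ∈ xs, pvGcdFold (xs.headD 0) xs.tail ∣ x := by
  cases xs with
  | nil => exact absurd rfl hne
  | cons h t =>
    intro x hx
    rcases List.mem_cons.mp hx with h1 | h1
    · subst h1; exact pvGcdFold_dvd_init t x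
    · exact pvGcdFold_dvd_mem t h x h1

theorem pv_filter_nz_pos (l : List (Int × Int)) :
    (l.filter (fun cp => decide (¬ cp.1 = 0))).filter (fun cp => decide (0 < cp.2))
      = l.filter (fun cp => decide (¬ cp.1 = 0 ∧ 0 < cp.2)) := by
  rw [List.filter_filter]
  apply List.filter_congr
  intro x _
  by_cases h1 : x.1 = 0 <;> by_cases h2 : 0 < x.2 <;> simp [h1, h2]

theorem pv_B_value (budzet : Int) (ceny strony : List Int)
    (hne : ¬ ceny = []) (hb : ¬ budzet ≤ 0) (hfast : ¬ ceny.sum ≤ budzet)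
    (hlen : ceny.length ≤ strony.length) :
    maksymalna_liczba_stron_alt budzet ceny strony
      = (PySem.List.max? (pvSparseFold budzet
            ((ceny.zip strony).filter (fun cp => decide (¬ cp.1 = 0 ∧ 0 < cp.2)))).values
          (fun v => v)).getD 0
        + (((ceny.zip strony).filter (fun cp => decide (cp.1 = 0))).map (·.2)).sum := by
  unfold maksymalna_liczba_stron_alt
  rw [if_neg (show ¬ (ceny.length = 0 ∨ budzet ≤ 0) by simp [hne, hb]), if_neg hfast]
  have h1 : (PySem.List.pyRange 0 (ceny.length : Int) 1).foldl
      (fun (st : Int × List (Int × Int)) i =>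
        if PySem.List.pyGetD ceny i 0 = 0 then (st.1 + PySem.List.pyGetD strony i 0, st.2)
        else if PySem.List.pyGetD strony i 0 > 0 then
          (st.1, st.2 ++ [(PySem.List.pyGetD ceny i 0, PySem.List.pyGetD strony i 0)])
        else st) (0, [])
      = (ceny.zip strony).foldl (fun (st : Int × List (Int × Int)) cp =>
          if cp.1 = 0 then (st.1 + cp.2, st.2)
          else if cp.2 > 0 then (st.1, st.2 ++ [cp]) else st) (0, []) :=
    pv_foldl_range_pair (fun (st : Int × List (Int × Int)) cp =>
        if cp.1 = 0 then (st.1 + cp.2, st.2)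
        else if cp.2 > 0 then (st.1, st.2 ++ [cp]) else st) ceny strony hlen (0, [])
  rw [h1, pv_extractB]
  simp only [List.nil_append, zero_add]
  rfl

theorem pv_A_value (budzet : Int) (ceny strony : List Int)
    (hne : ¬ ceny = []) (hb : ¬ budzet ≤ 0) (hfast : ¬ ceny.sum ≤ budzet)
    (hlen : ceny.length ≤ strony.length)
    (hnoneg : ∀ cp ∈ ceny.zip strony, ¬ (cp.1 < 0 ∧ 0 < cp.2)) :
    maksymalna_liczba_stron budzet ceny strony
      = pvBest ((ceny.zip strony).filter (fun cp => decide (¬ cp.1 = 0 ∧ 0 < cp.2))) budzet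
        + (((ceny.zip strony).filter (fun cp => decide (cp.1 = 0))).map (·.2)).sum := by
  unfold maksymalna_liczba_stron
  rw [if_neg (show ¬ (ceny.length = 0 ∨ budzet ≤ 0) by simp [hne, hb]),
    if_neg (show ¬ (List.foldl (· + ·) 0 ceny ≤ budzet) by rwa [← List.sum_eq_foldl])]
  have hzip : (PySem.List.pyRange 0 (ceny.length : Int) 1).foldl
      (fun (st : Int × List Int × List Int) i =>
        if PySem.List.pyGetD ceny i 0 = 0 then
          (st.1 + PySem.List.pyGetD strony i 0, st.2.1, st.2.2)
        else
          (st.1, st.2.1 ++ [PySem.List.pyGetD ceny i 0], st.2.2 ++ [PySem.List.pyGetD strony i 0]))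
      (0, [], [])
      = ((0 : Int) + (((ceny.zip strony).filter (fun cp => decide (cp.1 = 0))).map (·.2)).sum,
         ([] : List Int) ++ ((ceny.zip strony).filter (fun cp => decide (¬ cp.1 = 0))).map (·.1),
         ([] : List Int) ++ ((ceny.zip strony).filter (fun cp => decide (¬ cp.1 = 0))).map (·.2)) := by
    have h1 := pv_foldl_range_pair (fun (st : Int × List Int × List Int) cp =>
        if cp.1 = 0 then (st.1 + cp.2, st.2.1, st.2.2)
        else (st.1, st.2.1 ++ [cp.1], st.2.2 ++ [cp.2])) ceny strony hlen (0, [], [])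
    exact h1.trans (pv_extractA (ceny.zip strony) 0 [] [])
  rw [hzip]
  simp only [List.nil_append, zero_add]
  set l := ceny.zip strony with hl
  set lNZ := List.filter (fun cp => decide (¬ cp.1 = 0)) l with hlNZ
  set platne := List.filter (fun cp => decide (¬ cp.1 = 0 ∧ 0 < cp.2)) l with hplatne
  have hplatne_sub : ∀ cp ∈ platne, cp ∈ lNZ := by
    intro cp hcp
    obtain ⟨hmem, hprop⟩ := List.mem_filter.mp hcp
    simp only [decide_eq_true_eq] at hprop
    exact List.mem_filter.mpr ⟨hmem, by simp [hprop.1]⟩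
  have hplatne_props : ∀ cp ∈ platne, (1:Int) ≤ cp.1 ∧ 1 ≤ cp.2 := by
    intro cp hcp
    obtain ⟨hmem, hprop⟩ := List.mem_filter.mp hcp
    simp only [decide_eq_true_eq] at hprop
    have h2 := hnoneg cp hmem
    constructor <;> omega
  have hplatne_eq : List.filter (fun cp => decide (0 < cp.2)) lNZ = platne := by
    rw [hlNZ, hplatne]; exact pv_filter_nz_pos l
  by_cases hnzcE : List.map (fun x => x.1) lNZ = []
  · rw [if_pos hnzcE]
    have hlNZE : lNZ = [] := by
      rcases lNZ with _ | ⟨x, t⟩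
      · rfl
      · simp at hnzcE
    have hplE : platne = [] := by rw [← hplatne_eq, hlNZE]; rfl
    rw [hplE]
    simp [pvBest]
  · rw [if_neg hnzcE]
    congr 1
    set nzc := List.map (fun x => x.1) lNZ with hnzc
    set nzp := List.map (fun x => x.2) lNZ with hnzp
    set g := pvGcdFold (nzc.headD 0) nzc.tail with hgdef
    have hdvd : ∀ x ∈ nzc, g ∣ x := pvGcd_all_dvd nzc hnzcE
    have hlen2 : nzc.length = nzp.length := by rw [hnzc, hnzp]; simp
    have hzipnz : nzc.zip nzp = lNZ := by
      rw [hnzc, hnzp, List.zip_map']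
      simp
    have hbud1 : (1:Int) ≤ budzet := by omega
    by_cases hg1 : g > 1
    · simp only [if_pos hg1]
      set sc := List.map (fun c => PySem.Int.floordiv c g) nzc with hsc
      have hlen3 : sc.length ≤ nzp.length := by rw [hsc]; simp [hlen2]
      set sb := PySem.Int.floordiv budzet g with hsb
      have hsb0 : 0 ≤ sb := by
        rw [hsb, PySem.Int.le_floordiv_iff_mul_le (by omega)]; omega
      have hv' : List.foldl
          (fun dp i => if PySem.List.pyGetD nzp i 0 ≤ 0 then dp
            else pvDpItem sb (PySem.List.pyGetD sc i 0) (PySem.List.pyGetD nzp i 0) dp)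
          (List.replicate (sb + 1).toNat 0) (PySem.List.pyRange 0 (sc.length : Int) 1)
          = (sc.zip nzp).foldl
            (fun dp cp => if cp.2 ≤ 0 then dp else pvDpItem sb cp.1 cp.2 dp)
            (List.replicate (sb + 1).toNat 0) :=
        pv_foldl_range_pair
          (fun dp cp => if cp.2 ≤ 0 then dp else pvDpItem sb cp.1 cp.2 dp)
          sc nzp hlen3 (List.replicate (sb + 1).toNat 0)
      rw [hv']
      have hsczip : sc.zip nzp = lNZ.map (fun cp => (PySem.Int.floordiv cp.1 g, cp.2)) := by
        rw [hsc, hnzc, hnzp, List.map_map, List.zip_map']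
        rfl
      have hfoldfilter : (sc.zip nzp).foldl
            (fun dp cp => if cp.2 ≤ 0 then dp else pvDpItem sb cp.1 cp.2 dp)
            (List.replicate (sb + 1).toNat 0)
          = ((sc.zip nzp).filter (fun cp => decide (0 < cp.2))).foldl
            (fun dp cp => pvDpItem sb cp.1 cp.2 dp) (List.replicate (sb + 1).toNat 0) := by
        rw [List.foldl_filter]
        apply PySem.List.foldl_congr_mem
        intro acc x _
        by_cases hx : (0:Int) < x.2
        · rw [if_neg (by omega), if_pos (by simpa using hx)]
        · rw [if_pos (by omega), if_neg (by simpa using hx)]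
      have hfiltermap : (sc.zip nzp).filter (fun cp => decide (0 < cp.2))
          = platne.map (fun cp => (PySem.Int.floordiv cp.1 g, cp.2)) := by
        rw [hsczip, List.filter_map]
        rw [show ((fun cp => decide ((0:Int) < cp.2)) ∘
            (fun cp : Int × Int => (PySem.Int.floordiv cp.1 g, cp.2)))
          = fun cp : Int × Int => decide (0 < cp.2) from rfl]
        rw [hplatne_eq]
      have hdvd_pl : ∀ cp ∈ platne, g ∣ cp.1 := by
        intro cp hcp
        exact hdvd cp.1 (by rw [hnzc]; exact List.mem_map.mpr ⟨cp, hplatne_sub cp hcp, rfl⟩)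
      have hitems : ∀ cp ∈ platne.map (fun cp => (PySem.Int.floordiv cp.1 g, cp.2)),
          (1:Int) ≤ cp.1 ∧ 1 ≤ cp.2 := by
        intro cp hcp
        obtain ⟨q, hq, rfl⟩ := List.mem_map.mp hcp
        have hp := hplatne_props q hq
        obtain ⟨k, hk⟩ := hdvd_pl q hq
        have hk1 : 1 ≤ k := by nlinarith [hp.1]
        constructor
        · simp only []
          rw [hk, pvFloordiv_mul g k (by omega)]
          exact hk1
        · simpa using hp.2
      obtain ⟨hlenf, hgetf⟩ := pv_dp_fold sb hsb0
        (platne.map (fun cp => (PySem.Int.floordiv cp.1 g, cp.2))) hitems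
      rw [hfoldfilter, hfiltermap, hgetf sb hsb0 le_rfl, hsb]
      exact pvBest_scale g (by omega) platne budzet hdvd_pl
    · simp only [if_neg hg1]
      have hv' : List.foldl
          (fun dp i => if PySem.List.pyGetD nzp i 0 ≤ 0 then dp
            else pvDpItem budzet (PySem.List.pyGetD nzc i 0) (PySem.List.pyGetD nzp i 0) dp)
          (List.replicate (budzet + 1).toNat 0) (PySem.List.pyRange 0 (nzc.length : Int) 1)
          = (nzc.zip nzp).foldl
            (fun dp cp => if cp.2 ≤ 0 then dp else pvDpItem budzet cp.1 cp.2 dp)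
            (List.replicate (budzet + 1).toNat 0) :=
        pv_foldl_range_pair
          (fun dp cp => if cp.2 ≤ 0 then dp else pvDpItem budzet cp.1 cp.2 dp)
          nzc nzp (le_of_eq hlen2) (List.replicate (budzet + 1).toNat 0)
      rw [hv']
      have hfoldfilter : (nzc.zip nzp).foldl
            (fun dp cp => if cp.2 ≤ 0 then dp else pvDpItem budzet cp.1 cp.2 dp)
            (List.replicate (budzet + 1).toNat 0)
          = ((nzc.zip nzp).filter (fun cp => decide (0 < cp.2))).foldl
            (fun dp cp => pvDpItem budzet cp.1 cp.2 dp) (List.replicate (budzet + 1).toNat 0) := by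
        rw [List.foldl_filter]
        apply PySem.List.foldl_congr_mem
        intro acc x _
        by_cases hx : (0:Int) < x.2
        · rw [if_neg (by omega), if_pos (by simpa using hx)]
        · rw [if_pos (by omega), if_neg (by simpa using hx)]
      obtain ⟨hlenf, hgetf⟩ := pv_dp_fold budzet (by omega) platne hplatne_props
      rw [hfoldfilter, hzipnz, hplatne_eq, hgetf budzet (by omega) le_rfl]

-- ===== VERDICT (by name: the statement is the Claim_ definition above) =====
theorem maksymalna_liczba_stron_spec : Claim_equal_maksymalna_liczba_stron := by
  intro budzet ceny strony _hdom hpre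
  unfold Spec_maksymalna_liczba_stron
  by_cases hne : ceny = []
  · subst hne
    unfold maksymalna_liczba_stron maksymalna_liczba_stron_alt
    simp
  · by_cases hb : budzet ≤ 0
    · unfold maksymalna_liczba_stron maksymalna_liczba_stron_alt
      rw [if_pos (Or.inr hb), if_pos (Or.inr hb)]
    · by_cases hfast : ceny.sum ≤ budzet
      · unfold maksymalna_liczba_stron maksymalna_liczba_stron_alt
        rw [if_neg (show ¬ (ceny.length = 0 ∨ budzet ≤ 0) by simp [hne, hb]),
          if_neg (show ¬ (ceny.length = 0 ∨ budzet ≤ 0) by simp [hne, hb]),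
          if_pos (show List.foldl (· + ·) 0 ceny ≤ budzet by rwa [← List.sum_eq_foldl]),
          if_pos hfast]
      · rcases hpre with h | h | h | h
        · exact absurd h hne
        · exact absurd h hb
        · exact absurd h hfast
        · rw [pv_A_value budzet ceny strony hne hb hfast h.1 h.2,
            pv_B_value budzet ceny strony hne hb hfast h.1]
          congr 1
          have hpl : ∀ cp ∈ (ceny.zip strony).filter (fun cp => decide (¬ cp.1 = 0 ∧ 0 < cp.2)),
              (1:Int) ≤ cp.1 ∧ 1 ≤ cp.2 := by
            intro cp hcp
            obtain ⟨hmem, hprop⟩ := List.mem_filter.mp hcp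
            have h2 := h.2 cp hmem
            simp only [decide_eq_true_eq] at hprop
            constructor <;> omega
          rw [pv_sparse_max budzet (by omega) _ hpl]
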